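-- pv_equiv track=rewrite | github.com/bolewood/collegedata-fyi | tools/extraction_worker/tier4_cleaner.py | _i3_size_to_offset
-- ===== SOURCE A (Python) =====
-- _I3_SIZE_RANGES = [
--     "2-9", "10-19", "20-29", "30-39", "40-49", "50-99", "100+", "total",
-- ]
--
-- def _i3_size_to_offset(size_label_norm: str) -> int | None:
--     """Map a normalized size-range label ('2 9', '10 19', '100+', 'total')
--     back to its 0-based column index."""
--     size = size_label_norm.strip().replace(" ", "-").replace(",", "")
--     # Handle variants: "100 +" / "100+"
--     size = size.replace("-+", "+")
--     for idx, canonical in enumerate(_I3_SIZE_RANGES):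
--         if canonical == size:
--             return idx
--         # Fall back to loose match: '2-9' vs '2 9' (hyphen stripped)
--         if canonical.replace("-", "") == size.replace("-", ""):
--             return idx
--     return None
-- ===== SOURCE B (Python) =====
-- _I3_SIZE_RANGES = [
--     "2-9", "10-19", "20-29", "30-39", "40-49", "50-99", "100+", "total",
-- ]
--
-- # Hyphen-stripped canonical labels, in column order (the keys the loose match uses).
-- _I3_STRIPPED = [c.replace("-", "") for c in _I3_SIZE_RANGES]
--
--
-- def _i3_guess(t: str) -> int | None:
--     """Candidate column index computed directly from the shape of the
--     hyphen-stripped key: 't…'->7, two chars->0, '100…'->6, leading digit 1-5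
--     -> that digit.  A perfect hash for the eight keys; verified afterwards."""
--     if t.startswith("t"):
--         return 7
--     if len(t) == 2:
--         return 0
--     if t.startswith("100"):
--         return 6
--     c = t[:1]
--     if "1" <= c <= "5":
--         return ord(c) - ord("0")
--     return None
--
--
-- def _i3_size_to_offset(size_label_norm: str) -> int | None:
--     """Map a normalized size-range label ('2 9', '10 19', '100+', 'total')
--     back to its 0-based column index."""
--     size = size_label_norm.strip().replace(" ", "-").replace(",", "")
--     size = size.replace("-+", "+")
--     t = size.replace("-", "")        # exact match is subsumed by the loose key
--     i = _i3_guess(t)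
--     if i is not None and _I3_STRIPPED[i] == t:
--         return i
--     return None
-- ===== Notes on version B (the rewrite author's own statement) =====
-- stated objective: alternative
-- what changed: Replaces A's scan over the label list (two string comparisons per label) by a guess-and-verify perfect hash: the candidate column index is computed directly from the shape of the hyphen-stripped key (leading 't' -> 7, length 2 -> 0, prefix '100' -> 6, leading digit 1-5 -> that digit) and confirmed by a single comparison against the label at that index.
import Mathlib
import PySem

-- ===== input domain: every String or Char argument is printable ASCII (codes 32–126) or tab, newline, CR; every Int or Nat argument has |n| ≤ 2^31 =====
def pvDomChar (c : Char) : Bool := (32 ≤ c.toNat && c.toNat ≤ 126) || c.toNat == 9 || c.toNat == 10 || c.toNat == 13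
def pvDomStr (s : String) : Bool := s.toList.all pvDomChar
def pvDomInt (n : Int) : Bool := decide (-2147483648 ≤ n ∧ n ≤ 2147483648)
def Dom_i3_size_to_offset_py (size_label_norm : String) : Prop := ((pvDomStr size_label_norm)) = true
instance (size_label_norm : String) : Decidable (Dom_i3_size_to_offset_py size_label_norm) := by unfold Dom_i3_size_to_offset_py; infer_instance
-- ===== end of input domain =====

-- B replaces A's scan over the label list (two comparisons per label) by a
-- guess-and-verify perfect hash: the candidate index is computed from the shape
-- of the hyphen-stripped key and confirmed with ONE comparison (alternative).

-- ===== PORT A =====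
def pvI3SizeRanges : List String :=
  ["2-9", "10-19", "20-29", "30-39", "40-49", "50-99", "100+", "total"]

-- the 'for idx, canonical in enumerate(...)' loop with early return
def pvI3LoopA (size : String) : List (Int × String) → Option Int
  | [] => none
  | (idx, canonical) :: rest =>
    if canonical == size then some idx
    else if PySem.Str.replace canonical "-" "" == PySem.Str.replace size "-" "" then some idx
    else pvI3LoopA size rest

def i3_size_to_offset_py (size_label_norm : String) : Option Int :=
  let size0 := PySem.Str.replace (PySem.Str.replace (PySem.Str.strip size_label_norm) " " "-") "," ""
  let size := PySem.Str.replace size0 "-+" "+"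
  pvI3LoopA size (PySem.List.enumerate pvI3SizeRanges)

-- ===== PORT B =====
-- _I3_STRIPPED = [c.replace("-", "") for c in _I3_SIZE_RANGES]
def pvI3Stripped : List String :=
  pvI3SizeRanges.map (fun c => PySem.Str.replace c "-" "")

-- _i3_guess: candidate index from the shape of the key.  The last branch is
-- Python's `c = t[:1]; if "1" <= c <= "5": return ord(c) - ord("0")`, ported on
-- the head character of t (t[:1] is nonempty iff t is, and comparing / taking
-- ord of a one-character string is exactly comparing / taking the code of its
-- character) — exact on all strings.
def pvI3Guess (t : String) : Option Int :=
  if PySem.Str.startswith t "t" then some 7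
  else if PySem.Str.len t = 2 then some 0
  else if PySem.Str.startswith t "100" then some 6
  else
    match t.toList with
    | c :: _ => if '1' ≤ c ∧ c ≤ '5' then some ((c.toNat : Int) - 48) else none
    | [] => none

def i3_size_to_offset_py_alt (size_label_norm : String) : Option Int :=
  let size0 := PySem.Str.replace (PySem.Str.replace (PySem.Str.strip size_label_norm) " " "-") "," ""
  let size := PySem.Str.replace size0 "-+" "+"
  let t := PySem.Str.replace size "-" ""
  match pvI3Guess t with
  | some i =>
    -- _I3_STRIPPED[i]: i is always 0..7 here, so pyGet? is always some
    match PySem.List.pyGet? pvI3Stripped i with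
    | some lab => if lab == t then some i else none
    | none => none
  | none => none

-- ===== PRECONDITION & SPEC =====
def Spec_i3_size_to_offset_py (size_label_norm : String) (out : Option Int) : Prop := out = i3_size_to_offset_py_alt size_label_norm
instance (size_label_norm : String) (out : Option Int) : Decidable (Spec_i3_size_to_offset_py size_label_norm out) := by unfold Spec_i3_size_to_offset_py; infer_instance

-- ===== CLAIM =====
def Claim_equal_i3_size_to_offset_py : Prop := ∀ (size_label_norm : String), Dom_i3_size_to_offset_py size_label_norm → Spec_i3_size_to_offset_py size_label_norm (i3_size_to_offset_py size_label_norm)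

-- ===== LEMMAS AND PROOFS =====

-- the normalized, hyphen-stripped key both programs branch on
def pvI3Key (s : String) : String :=
  PySem.Str.replace (PySem.Str.replace (PySem.Str.replace (PySem.Str.replace
    (PySem.Str.strip s) " " "-") "," "") "-+" "+") "-" ""

-- A's chain of stripped-key comparisons, as a function
def pvI3Chain (t : String) : Option Int :=
  if "29" = t then some 0 else if "1019" = t then some 1
  else if "2029" = t then some 2 else if "3039" = t then some 3
  else if "4049" = t then some 4 else if "5099" = t then some 5
  else if "100+" = t then some 6 else if "total" = t then some 7 else none

-- the core of B, as a function of the stripped key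
def pvI3Check (t : String) : Option Int :=
  match pvI3Guess t with
  | some i =>
    match PySem.List.pyGet? pvI3Stripped i with
    | some lab => if lab == t then some i else none
    | none => none
  | none => none

-- the exact-match test of A is subsumed by the hyphen-stripped test
theorem pvI3_step (canonical size : String) (idx : Int) (k : Option Int) :
    (if canonical = size then some idx
     else if PySem.Str.replace canonical "-" "" = PySem.Str.replace size "-" "" then some idx
     else k)
    = (if PySem.Str.replace canonical "-" "" = PySem.Str.replace size "-" "" then some idx else k) := by
  by_cases h : canonical = size
  · subst h; simp
  · simp [h]

-- A equals the comparison chain on the stripped key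
theorem pvA_eq_chain (s : String) : i3_size_to_offset_py s = pvI3Chain (pvI3Key s) := by
  unfold i3_size_to_offset_py pvI3Key pvI3Chain
  generalize PySem.Str.replace (PySem.Str.replace (PySem.Str.strip s) " " "-") "," "" = size0
  norm_num [pvI3SizeRanges, PySem.List.enumerate, pvI3LoopA]
  simp only [pvI3_step]
  norm_num [show PySem.Str.replace "2-9" "-" "" = "29" from by decide,
    show PySem.Str.replace "10-19" "-" "" = "1019" from by decide,
    show PySem.Str.replace "20-29" "-" "" = "2029" from by decide,
    show PySem.Str.replace "30-39" "-" "" = "3039" from by decide,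
    show PySem.Str.replace "40-49" "-" "" = "4049" from by decide,
    show PySem.Str.replace "50-99" "-" "" = "5099" from by decide,
    show PySem.Str.replace "100+" "-" "" = "100+" from by decide,
    show PySem.Str.replace "total" "-" "" = "total" from by decide]

theorem pvB_eq_check (s : String) : i3_size_to_offset_py_alt s = pvI3Check (pvI3Key s) := by
  unfold i3_size_to_offset_py_alt pvI3Check pvI3Key
  rfl

-- A's chain agrees with B's guess-and-verify on EVERY string t
theorem pvI3_chain_eq_check (t : String) : pvI3Chain t = pvI3Check t := by
  by_cases h0 : "29" = t
  · subst h0; decide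
  by_cases h1 : "1019" = t
  · subst h1; decide
  by_cases h2 : "2029" = t
  · subst h2; decide
  by_cases h3 : "3039" = t
  · subst h3; decide
  by_cases h4 : "4049" = t
  · subst h4; decide
  by_cases h5 : "5099" = t
  · subst h5; decide
  by_cases h6 : "100+" = t
  · subst h6; decide
  by_cases h7 : "total" = t
  · subst h7; decide
  unfold pvI3Chain
  simp only [h0, h1, h2, h3, h4, h5, h6, h7, if_false]
  -- the chain is none; show guess-and-verify also yields none
  unfold pvI3Check pvI3Guess
  split_ifs with g0 g1 g2
  · -- guess 7, verify against "total"
    have hg : PySem.List.pyGet? pvI3Stripped (7 : Int) = some "total" := by decide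
    simp [hg, h7]
  · -- guess 0, verify against "29"
    have hg : PySem.List.pyGet? pvI3Stripped (0 : Int) = some "29" := by decide
    simp [hg, h0]
  · -- guess 6, verify against "100+"
    have hg : PySem.List.pyGet? pvI3Stripped (6 : Int) = some "100+" := by decide
    simp [hg, h6]
  · -- last branch: head character 1..5
    cases hc : t.toList with
    | nil => rfl
    | cons c rest =>
      by_cases hr : '1' ≤ c ∧ c ≤ '5'
      · simp only [hr]
        have hv : c.toNat = 49 ∨ c.toNat = 50 ∨ c.toNat = 51 ∨ c.toNat = 52 ∨ c.toNat = 53 := by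
          obtain ⟨l, r⟩ := hr
          have l' : (49 : Nat) ≤ c.toNat := l
          have r' : c.toNat ≤ (53 : Nat) := r
          omega
        rcases hv with hv | hv | hv | hv | hv
        · have hi : ((c.toNat : Int) - 48) = 1 := by rw [hv]; norm_num
          have hg : PySem.List.pyGet? pvI3Stripped (1 : Int) = some "1019" := by decide
          rw [hi]; simp [hg, h1]
        · have hi : ((c.toNat : Int) - 48) = 2 := by rw [hv]; norm_num
          have hg : PySem.List.pyGet? pvI3Stripped (2 : Int) = some "2029" := by decide
          rw [hi]; simp [hg, h2]
        · have hi : ((c.toNat : Int) - 48) = 3 := by rw [hv]; norm_num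
          have hg : PySem.List.pyGet? pvI3Stripped (3 : Int) = some "3039" := by decide
          rw [hi]; simp [hg, h3]
        · have hi : ((c.toNat : Int) - 48) = 4 := by rw [hv]; norm_num
          have hg : PySem.List.pyGet? pvI3Stripped (4 : Int) = some "4049" := by decide
          rw [hi]; simp [hg, h4]
        · have hi : ((c.toNat : Int) - 48) = 5 := by rw [hv]; norm_num
          have hg : PySem.List.pyGet? pvI3Stripped (5 : Int) = some "5099" := by decide
          rw [hi]; simp [hg, h5]
      · simp [hr]

-- ===== VERDICT =====
theorem i3_size_to_offset_py_spec : Claim_equal_i3_size_to_offset_py := by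
  intro s _
  unfold Spec_i3_size_to_offset_py
  rw [pvA_eq_chain, pvB_eq_check, pvI3_chain_eq_check]
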